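-- pv_equiv track=rewrite | github.com/RalphHan/TabularCellTypeClassification | deploy/rule_predict.py | locate_table
-- ===== SOURCE A (Python) =====
-- def locate_table(texts):
--     lengths=[len([1 for x in text if x!='']) for text in texts]
--     i=0
--     for length in lengths:
--         if length>1:
--             break
--         i+=1
--     j=len(texts)-1
--     for length in lengths[::-1]:
--         if length>1:
--             break
--         j-=1
--     assert i<=j
--     return i,j
-- ===== SOURCE B (Python) =====
-- def locate_table(texts):
--     first = None
--     last = None
--     for k, text in enumerate(texts):
--         c = 0
--         for x in text:
--             if x != '':
--                 c += 1
--         if c > 1: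
--             if first is None:
--                 first = k
--             last = k
--     i = first if first is not None else len(texts)
--     j = last if last is not None else -1
--     assert i <= j
--     return i, j
-- ===== Notes on version B (the rewrite author's own statement) =====
-- stated objective: alternative
-- what changed: Replaces A's precomputed length list plus two separate scans (forward, and over the reversed list) with a single forward pass that counts each row's non-empty cells once and maintains the first and last qualifying indices.
import Mathlib
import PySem

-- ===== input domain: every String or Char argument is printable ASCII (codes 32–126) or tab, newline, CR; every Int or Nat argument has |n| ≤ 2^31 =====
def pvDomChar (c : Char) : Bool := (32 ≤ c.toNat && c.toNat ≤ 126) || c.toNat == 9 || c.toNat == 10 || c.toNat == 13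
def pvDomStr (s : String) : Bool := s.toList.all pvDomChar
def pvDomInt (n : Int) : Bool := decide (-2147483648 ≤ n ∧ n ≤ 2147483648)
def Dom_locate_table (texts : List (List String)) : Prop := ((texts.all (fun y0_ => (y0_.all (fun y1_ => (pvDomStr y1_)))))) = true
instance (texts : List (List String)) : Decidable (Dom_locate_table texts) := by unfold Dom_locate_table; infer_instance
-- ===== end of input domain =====

-- B replaces A's length list and two separate scans (forward and over the reversed
-- list) with one forward pass maintaining the first and last qualifying row indices
-- (alternative decomposition, same cost).


-- ===== PORT A =====
-- lengths = [len([1 for x in text if x != '']) for text in texts]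
def pvLen1 (text : List String) : Nat :=
  ((text.filter (fun x => x != "")).map (fun _ => (1 : Nat))).length

-- i = 0; for length in <ls>: if length > 1: break; i += 1   (returns final i)
def pvScan : List Nat → Int
  | [] => 0
  | l :: rest => if 1 < l then 0 else 1 + pvScan rest

def locate_table (texts : List (List String)) : Int × Int :=
  let lengths := texts.map pvLen1
  let i : Int := pvScan lengths
  -- lengths[::-1] is the full reversal, ported as List.reverse (exact);
  -- the j loop decrements j once per element scanned before the break.
  let j : Int := (texts.length : Int) - 1 - pvScan lengths.reverse
  (i, j)

-- ===== PORT B =====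
-- c = 0; for x in text: if x != '': c += 1
def pvCountB (text : List String) : Nat :=
  text.foldl (fun a x => if x != "" then a + 1 else a) 0

-- loop body: if c > 1: first = first if set else k; last = k
def pvStepB (st : Option Int × Option Int) (kt : Int × List String) : Option Int × Option Int :=
  if 1 < pvCountB kt.2 then
    ((match st.1 with | some v => some v | none => some kt.1), some kt.1)
  else st

def locate_table_alt (texts : List (List String)) : Int × Int :=
  let fl := (PySem.List.enumerate texts 0).foldl pvStepB (none, none)
  (fl.1.getD (texts.length : Int), fl.2.getD (-1))

-- ===== PRECONDITION & SPEC =====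
-- Pre_ excludes exactly the inputs where A raises AssertionError (assert i <= j):
-- those with no row containing more than one non-empty cell.
def Pre_locate_table (texts : List (List String)) : Prop :=
  ∃ t ∈ texts, 1 < (t.filter (fun x => x != "")).length
instance (texts : List (List String)) : Decidable (Pre_locate_table texts) := by unfold Pre_locate_table; infer_instance
def pvWitness_locate_table : List (List String) := [["a", "b"]]

def Spec_locate_table (texts : List (List String)) (out : Int × Int) : Prop := out = locate_table_alt texts
instance (texts : List (List String)) (out : Int × Int) : Decidable (Spec_locate_table texts out) := by unfold Spec_locate_table; infer_instance

-- ===== CLAIM (what is proved, stated in full; the proofs are below) =====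
def Claim_equal_locate_table : Prop := ∀ (texts : List (List String)), Dom_locate_table texts → Pre_locate_table texts → Spec_locate_table texts (locate_table texts)

-- ===== LEMMAS AND PROOFS =====

-- B's per-row count equals A's per-row length
theorem pvCountB_eq (t : List String) : pvCountB t = pvLen1 t := by
  have h : ∀ (l : List String) (a : Nat),
      l.foldl (fun a x => if x != "" then a + 1 else a) a
        = a + (l.filter (fun x => x != "")).length := by
    intro l
    induction l with
    | nil => intro a; simp
    | cons x xs ih =>
      intro a
      rw [List.foldl_cons, List.filter_cons]
      by_cases hx : (x != "") = true
      · rw [if_pos hx, if_pos hx, ih, List.length_cons]; omega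
      · rw [if_neg hx, if_neg hx, ih]
  rw [pvCountB, h t 0, pvLen1, List.length_map, Nat.zero_add]

-- qualifying test on a row
def pvQ (t : List String) : Bool := decide (1 < pvLen1 t)

-- offset of the last qualifying row (meaningful only when one exists)
def pvLastOff : List (List String) → Int
  | [] => 0
  | _ :: rest => if rest.any pvQ then 1 + pvLastOff rest else 0

theorem foldB_char (texts : List (List String)) :
    ∀ (n : Int) (f0 l0 : Option Int),
      (PySem.List.enumerate texts n).foldl pvStepB (f0, l0) =
        (if texts.any pvQ then
          ((match f0 with | some v => some v | none => some (n + pvScan (texts.map pvLen1))),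
           some (n + pvLastOff texts))
        else (f0, l0)) := by
  induction texts with
  | nil => intro n f0 l0; simp [PySem.List.enumerate_nil]
  | cons t rest ih =>
    intro n f0 l0
    have hstep : pvStepB (f0, l0) (n, t)
        = if 1 < pvLen1 t then
            ((match f0 with | some v => some v | none => some n), some n)
          else (f0, l0) := by
      simp [pvStepB, pvCountB_eq]
    rw [PySem.List.enumerate_cons, List.foldl_cons, hstep]
    by_cases hq : 1 < pvLen1 t
    · have hQ : pvQ t = true := by simp [pvQ, hq]
      rw [if_pos hq, ih]
      by_cases hr : rest.any pvQ = true
      · simp only [hr, List.any_cons, hQ, Bool.true_or, if_true, pvLastOff]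
        cases f0 <;> simp [pvScan, hq] <;> omega
      · simp only [hr, List.any_cons, hQ, Bool.true_or, if_true, if_false, pvLastOff,
          Bool.false_eq_true, List.map_cons]
        cases f0 <;> simp [pvScan, hq]
    · have hQ : pvQ t = false := by simp [pvQ, hq]
      rw [if_neg hq, ih]
      by_cases hr : rest.any pvQ = true
      · simp only [hr, List.any_cons, hQ, Bool.false_or, if_true, pvLastOff,
          List.map_cons]
        cases f0 <;> simp [pvScan, hq] <;> omega
      · simp [hr, hQ]

theorem pvScan_none (ls : List Nat) (h : ls.all (fun l => decide (¬ 1 < l)) = true) :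
    pvScan ls = (ls.length : Int) := by
  induction ls with
  | nil => rfl
  | cons l rest ih =>
    simp only [List.all_cons, Bool.and_eq_true, decide_eq_true_eq] at h
    simp [pvScan, h.1, ih h.2]
    omega

theorem pvScan_append (xs ys : List Nat) :
    pvScan (xs ++ ys) = if xs.any (fun l => decide (1 < l)) then pvScan xs else (xs.length : Int) + pvScan ys := by
  induction xs with
  | nil => simp
  | cons x rest ih =>
    by_cases hx : 1 < x
    · simp only [List.cons_append, pvScan, List.any_cons, hx, decide_true, Bool.true_or, if_true]
    · simp only [List.cons_append, pvScan, if_neg hx, ih, List.any_cons]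
      by_cases hr : rest.any (fun l => decide (1 < l)) = true
      · simp [hr, hx]
      · simp [hr, hx]
        omega

theorem pvLastOff_eq (texts : List (List String)) (h : texts.any pvQ = true) :
    pvLastOff texts = (texts.length : Int) - 1 - pvScan (texts.map pvLen1).reverse := by
  induction texts with
  | nil => simp at h
  | cons t rest ih =>
    have hrev : (((t :: rest).map pvLen1).reverse) = (rest.map pvLen1).reverse ++ [pvLen1 t] := by
      simp
    rw [hrev, pvScan_append]
    have hany : (rest.map pvLen1).reverse.any (fun l => decide (1 < l)) = rest.any pvQ := by
      rw [List.any_reverse, List.any_map]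
      congr 1
    by_cases hr : rest.any pvQ = true
    · simp only [pvLastOff, hr, if_true, ih hr, hany]
      simp
      omega
    · simp only [List.any_cons, hr, Bool.or_false] at h
      have hq : 1 < pvLen1 t := by simpa [pvQ] using h
      have hnone : pvScan (rest.map pvLen1).reverse = ((rest.map pvLen1).reverse.length : Int) := by
        apply pvScan_none
        rw [List.all_eq_true]
        intro l hl
        rw [List.mem_reverse, List.mem_map] at hl
        obtain ⟨u, hu, rfl⟩ := hl
        have := List.any_eq_false.mp (by simpa using hr) u hu
        simpa [pvQ] using this
      simp only [pvLastOff, hr, hany, Bool.false_eq_true, if_false, hnone]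
      simp [pvScan, hq]

theorem ports_eq (texts : List (List String)) (h : texts.any pvQ = true) :
    locate_table texts = locate_table_alt texts := by
  unfold locate_table locate_table_alt
  rw [foldB_char texts 0 none none, if_pos h]
  simp only [Option.getD_some]
  rw [pvLastOff_eq texts h]
  simp

-- ===== VERDICT (by name: the statement is the Claim_ definition above) =====
theorem locate_table_spec : Claim_equal_locate_table := by
  intro texts _ hpre
  unfold Spec_locate_table
  rw [ports_eq texts ?_]
  obtain ⟨t, ht, hlt⟩ := hpre
  rw [List.any_eq_true]
  exact ⟨t, ht, by simp [pvQ, pvLen1]; omega⟩
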